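-- pv_equiv track=rewrite | github.com/nextdesusu/Learn-Python | SICP/examples/sets_as_ordered_lists.py | union_sets
-- ===== SOURCE A (Python) =====
-- null = lambda x: not x
--
-- def union_sets(set1, set2):
--     res = []
--     ended = False
--     while not ended:
--         if null(set1):
--             res.extend(set2)
--             break
--         if null(set2):
--             res.extend(set1)
--             break
--         x1 = set1[0]
--         x2 = set2[0]
--         if x1 == x2:
--             res.append(x1)
--             set1 = set1[1::]
--             set2 = set2[1::]
--         if x1 < x2:
--             res.append(x1)
--             set1 = set1[1::]
--         if x2 < x1:
--             res.append(x2)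
--             set2 = set2[1::]
--     return res
-- ===== SOURCE B (Python) =====
-- def union_sets(set1, set2):
--     i = j = 0
--     n, m = len(set1), len(set2)
--     res = []
--     while i < n and j < m:
--         x, y = set1[i], set2[j]
--         if x <= y:
--             res.append(x)
--             i += 1
--             if x == y:
--                 j += 1
--         else:
--             res.append(y)
--             j += 1
--     res.extend(set1[i:])
--     res.extend(set2[j:])
--     return res
-- ===== Notes on version B (the rewrite author's own statement) =====
-- stated objective: faster
-- what changed: Replaces the while-loop that repeatedly re-slices both lists (set1[1::] copies the whole tail each step, O(n^2) total) with a two-pointer merge over integer indices plus two final extends, O(n+m).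
import Mathlib
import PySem

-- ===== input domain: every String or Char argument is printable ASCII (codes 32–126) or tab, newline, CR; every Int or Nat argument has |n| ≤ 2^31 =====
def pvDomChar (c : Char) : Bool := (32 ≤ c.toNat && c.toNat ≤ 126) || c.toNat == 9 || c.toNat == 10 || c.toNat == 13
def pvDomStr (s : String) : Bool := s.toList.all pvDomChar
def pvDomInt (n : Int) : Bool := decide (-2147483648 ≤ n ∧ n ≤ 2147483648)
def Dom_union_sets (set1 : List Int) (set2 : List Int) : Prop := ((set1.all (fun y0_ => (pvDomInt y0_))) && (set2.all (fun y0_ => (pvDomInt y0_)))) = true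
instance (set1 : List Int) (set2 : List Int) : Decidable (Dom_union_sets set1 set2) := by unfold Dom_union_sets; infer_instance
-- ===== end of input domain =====

-- B replaces A's re-slicing while-loop with a two-pointer index merge (O(n+m) instead of O((n+m)^2)); same return value on all inputs.


-- ===== PORT A =====
-- A's while-loop: each iteration looks at the heads x1, x2; the three ifs in A's body are
-- mutually exclusive (x1 == x2 / x1 < x2 / x2 < x1), so exactly one fires per iteration and
-- the loop is transcribed as this recursion over (res, set1, set2).
def unionA_loop (res : List Int) (set1 : List Int) (set2 : List Int) : List Int :=
  match set1, set2 with
  | [], _ => res ++ set2            -- if null(set1): res.extend(set2); break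
  | _, [] => res ++ set1            -- if null(set2): res.extend(set1); break
  | x1 :: t1, x2 :: t2 =>
    if x1 = x2 then unionA_loop (res ++ [x1]) t1 t2
    else if x1 < x2 then unionA_loop (res ++ [x1]) t1 (x2 :: t2)
    else unionA_loop (res ++ [x2]) (x1 :: t1) t2
termination_by set1.length + set2.length

def union_sets (set1 : List Int) (set2 : List Int) : List Int :=
  unionA_loop [] set1 set2

-- ===== PORT B =====
-- B's while-loop over integer indices i, j into the unchanged lists, then the two extends.
def unionB_loop (s1 s2 : List Int) (i j : Nat) (res : List Int) : List Int :=
  if h : i < s1.length ∧ j < s2.length then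
    let x := s1.getD i 0
    let y := s2.getD j 0
    if x ≤ y then
      unionB_loop s1 s2 (i + 1) (if x = y then j + 1 else j) (res ++ [x])
    else
      unionB_loop s1 s2 i (j + 1) (res ++ [y])
  else
    res ++ s1.drop i ++ s2.drop j
termination_by (s1.length - i) + (s2.length - j)
decreasing_by all_goals first | (split <;> omega) | omega

def union_sets_alt (set1 : List Int) (set2 : List Int) : List Int :=
  unionB_loop set1 set2 0 0 []

-- ===== PRECONDITION & SPEC =====
def Spec_union_sets (set1 : List Int) (set2 : List Int) (out : List Int) : Prop := out = union_sets_alt set1 set2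
instance (set1 : List Int) (set2 : List Int) (out : List Int) : Decidable (Spec_union_sets set1 set2 out) := by unfold Spec_union_sets; infer_instance

-- ===== CLAIM (what is proved, stated in full; the proofs are below) =====
def Claim_equal_union_sets : Prop := ∀ (set1 : List Int) (set2 : List Int), Dom_union_sets set1 set2 → Spec_union_sets set1 set2 (union_sets set1 set2)

-- ===== LEMMAS AND PROOFS =====

lemma unionB_eq_unionA (s1 s2 : List Int) :
    ∀ i j res, unionB_loop s1 s2 i j res = unionA_loop res (s1.drop i) (s2.drop j) := by
  intro i j res
  induction i, j, res using unionB_loop.induct s1 s2 with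
  | case1 i j res h x y hxy ih =>
      have hgx : s1.getD i 0 = x := rfl
      have hgy : s2.getD j 0 = y := rfl
      have hx : x = s1[i] := List.getD_eq_getElem s1 0 h.1
      have hy : y = s2[j] := List.getD_eq_getElem s2 0 h.2
      rw [unionB_loop, dif_pos h]
      simp only [hgx, hgy]
      rw [if_pos hxy]
      rw [List.drop_eq_getElem_cons h.1, List.drop_eq_getElem_cons h.2, unionA_loop, ← hx, ← hy]
      by_cases he : x = y
      · simp only [he, if_pos, dite_true] at ih ⊢
        exact ih
      · have hlt : x < y := lt_of_le_of_ne hxy he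
        rw [if_neg he, if_pos hlt]
        have hcons : (y :: s2.drop (j + 1)) = s2.drop j := by
          rw [List.drop_eq_getElem_cons h.2, hy]
        rw [hcons]
        simpa [he] using ih
  | case2 i j res h x y hxy ih =>
      have hgx : s1.getD i 0 = x := rfl
      have hgy : s2.getD j 0 = y := rfl
      have hx : x = s1[i] := List.getD_eq_getElem s1 0 h.1
      have hy : y = s2[j] := List.getD_eq_getElem s2 0 h.2
      rw [unionB_loop, dif_pos h]
      simp only [hgx, hgy]
      rw [if_neg hxy, ih]
      have hlt : y < x := lt_of_not_ge hxy
      rw [List.drop_eq_getElem_cons h.1, List.drop_eq_getElem_cons h.2, unionA_loop, ← hx, ← hy]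
      rw [if_neg (ne_of_gt hlt), if_neg (not_lt_of_ge (le_of_lt hlt))]
  | case3 i j res h =>
      rw [unionB_loop, dif_neg h]
      rcases not_and_or.mp h with h1 | h2
      · have hnil : s1.drop i = [] := List.drop_eq_nil_of_le (by omega)
        simp [hnil, unionA_loop]
      · have hnil : s2.drop j = [] := List.drop_eq_nil_of_le (by omega)
        rw [hnil]
        cases hd : s1.drop i with
        | nil => simp [unionA_loop]
        | cons a t => simp [unionA_loop]

-- ===== VERDICT (by name: the statement is the Claim_ definition above) =====
theorem union_sets_spec : Claim_equal_union_sets := by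
  intro s1 s2 _
  unfold Spec_union_sets union_sets union_sets_alt
  rw [unionB_eq_unionA]
  simp
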